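/- GENERATED by farm/mkstatement.py from design/units.tsv (unit `codebook_decode_step`) and the Specs of Vorbis/Spec/*.lean — do not edit.
   THE STATEMENT of the proof unit `codebook_decode_step`: the function `codebook_decode_step` (67 instructions) satisfies its contract,
   given the contracts of its callees. What the names mean: Vorbis/Spec/Basic.lean. The theorem to prove:
   `theorem codebook_decode_step_ok : Vorbis.Spec.codebook_decode_step.Statement`. -/
import Vorbis.Spec.Codebook
namespace Vorbis.Spec.codebook_decode_step
open X86 X86.User Asan

/-- The statement of unit `codebook_decode_step`. -/
def Statement : Prop :=
  ∀ (Lay : Layout) (_hLay : Lay.hi = 0x1000000) (μ : Microarch) (_hμ : UserX.MicroOK μ) (u₀ : State)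
    (_hcode : HasCodeNat Lay u₀ Vorbis.L.codebook_decode_step.entry Vorbis.Code.code_codebook_decode_step.nat Vorbis.L.codebook_decode_step.size)
    (_h_codebook_decode_start : ∀ (others : List Obj) (frames : List (Nat × FrameLayout)) (Blk : Block → Prop) (len : Nat), Calls Lay μ Vorbis.WayInv (Vorbis.conv u₀) Vorbis.L.codebook_decode_start.entry (Vorbis.Spec.codebook_decode_start.spec others frames Blk len))
    (_h_asan_load4_noabort : Asan.SmallCheck Lay μ Vorbis.WayInv (Vorbis.CodeOK u₀) [.rax, .rcx, .rdx] 4 Vorbis.L.__asan_load4_noabort.entry)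
    (_h_asan_load8_noabort : Asan.SmallCheck Lay μ Vorbis.WayInv (Vorbis.CodeOK u₀) [.rax, .rcx, .rdx] 8 Vorbis.L.__asan_load8_noabort.entry)
    (_h_asan_load1_noabort : Asan.SmallCheck Lay μ Vorbis.WayInv (Vorbis.CodeOK u₀) [.rax, .rdx] 1 Vorbis.L.__asan_load1_noabort.entry),
    ∀ (others : List Obj) (frames : List (Nat × FrameLayout)) (Blk : Block → Prop) (len : Nat), Calls Lay μ Vorbis.WayInv (Vorbis.conv u₀) Vorbis.L.codebook_decode_step.entry (Vorbis.Spec.codebook_decode_step.spec others frames Blk len)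

end Vorbis.Spec.codebook_decode_step
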